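-- pv_equiv track=rewrite | github.com/thomaspeyrin/XORreduce | main_localopt.py | sort_by_depth
-- ===== SOURCE A (Python) =====
-- def sort_by_depth(line_depth,l_list):
--     # sort the l_list, by the depth in ascending order
--     A = []
--     for l in l_list:
--         A.append([min(line_depth[l[0]],line_depth[l[1]]),l])
--     def myfunc(s):
--         return s[0]
--     A.sort(key=myfunc)
--     return A
-- ===== SOURCE B (Python) =====
-- def sort_by_depth(line_depth, l_list):
--     # group the elements into buckets keyed by their depth, then concatenate
--     # the buckets in ascending depth order (input order kept within a bucket)
--     buckets = {}
--     for l in l_list: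
--         d = min(line_depth[l[0]], line_depth[l[1]])
--         buckets[d] = buckets.get(d, []) + [[d, l]]
--     out = []
--     for d in sorted(buckets):
--         out += buckets[d]
--     return out
-- ===== Notes on version B (the rewrite author's own statement) =====
-- stated objective: alternative
-- what changed: Replaces the build-then-stable-sort of [depth, l] pairs by a group-by construction: one pass fills depth-keyed buckets (input order kept within a bucket), and the result is the buckets concatenated over the sorted distinct depths.
import Mathlib
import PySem

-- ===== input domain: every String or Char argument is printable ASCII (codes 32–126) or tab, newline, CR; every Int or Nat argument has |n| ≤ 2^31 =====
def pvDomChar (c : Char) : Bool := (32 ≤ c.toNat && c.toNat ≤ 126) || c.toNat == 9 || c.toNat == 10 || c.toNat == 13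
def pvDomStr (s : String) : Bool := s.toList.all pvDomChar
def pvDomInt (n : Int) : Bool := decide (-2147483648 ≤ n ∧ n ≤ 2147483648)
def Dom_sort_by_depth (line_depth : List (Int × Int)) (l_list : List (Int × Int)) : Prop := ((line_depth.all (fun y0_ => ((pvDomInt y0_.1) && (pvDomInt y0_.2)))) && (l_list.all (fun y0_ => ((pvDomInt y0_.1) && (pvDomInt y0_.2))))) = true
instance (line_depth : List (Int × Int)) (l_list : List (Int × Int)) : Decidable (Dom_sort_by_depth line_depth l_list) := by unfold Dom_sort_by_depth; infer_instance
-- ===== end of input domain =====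

-- B replaces the build-then-stable-sort of A by a group-by-depth bucket construction;
-- objective: alternative algorithm (equivalence of return values proved below).


-- ===== PORT A =====
-- line_depth is a Python dict[int,int]; `line_depth[i]` is a dict lookup (KeyError
-- when missing — excluded by Pre_; inside Pre_ the `.getD 0` default is never used).
def pvDepth (line_depth : List (Int × Int)) (i : Int) : Int :=
  ((PySem.Dict.mk line_depth).get? i).getD 0

def sort_by_depth (line_depth : List (Int × Int)) (l_list : List (Int × Int)) : List (Int × (Int × Int)) :=
  let A := l_list.foldl
    (fun acc l => acc ++ [(min (pvDepth line_depth l.1) (pvDepth line_depth l.2), l)]) []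
  PySem.List.sorted A (fun s => s.1)

-- ===== PORT B =====
def sort_by_depth_alt (line_depth : List (Int × Int)) (l_list : List (Int × Int)) : List (Int × (Int × Int)) :=
  let buckets := l_list.foldl
    (fun bs l =>
      let d := min (pvDepth line_depth l.1) (pvDepth line_depth l.2)
      bs.modify d [] (fun b => b ++ [(d, l)]))
    (PySem.Dict.empty : PySem.Dict Int (List (Int × (Int × Int))))
  (PySem.List.sorted buckets.keys (fun k => k)).foldl
    (fun out d => out ++ buckets.getD d []) []

-- ===== PRECONDITION & SPEC =====
-- Pre_ excludes exactly the inputs where Python A raises KeyError: some endpoint of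
-- an element of l_list is not a key of the line_depth dict.
def Pre_sort_by_depth (line_depth : List (Int × Int)) (l_list : List (Int × Int)) : Prop :=
  ∀ l ∈ l_list, (PySem.Dict.mk line_depth).contains l.1 = true ∧ (PySem.Dict.mk line_depth).contains l.2 = true
instance (line_depth : List (Int × Int)) (l_list : List (Int × Int)) : Decidable (Pre_sort_by_depth line_depth l_list) := by unfold Pre_sort_by_depth; infer_instance

def pvWitness_sort_by_depth : (List (Int × Int)) × (List (Int × Int)) :=
  ([(0, 5), (1, 2), (2, 2)], [(0, 1), (1, 2), (0, 2)])

def Spec_sort_by_depth (line_depth : List (Int × Int)) (l_list : List (Int × Int)) (out : List (Int × (Int × Int))) : Prop := out = sort_by_depth_alt line_depth l_list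
instance (line_depth : List (Int × Int)) (l_list : List (Int × Int)) (out : List (Int × (Int × Int))) : Decidable (Spec_sort_by_depth line_depth l_list out) := by unfold Spec_sort_by_depth; infer_instance

-- ===== CLAIM (what is proved, stated in full; the proofs are below) =====
def Claim_equal_sort_by_depth : Prop := ∀ (line_depth : List (Int × Int)) (l_list : List (Int × Int)), Dom_sort_by_depth line_depth l_list → Pre_sort_by_depth line_depth l_list → Spec_sort_by_depth line_depth l_list (sort_by_depth line_depth l_list)

-- ===== LEMMAS AND PROOFS =====

-- inserting x before the first element it is `before` skips a prefix it is not `before`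
theorem insertBy_append_of_not_before {α : Type} (before : α → α → Bool) (x : α)
    (L1 L2 : List α) (h : ∀ y ∈ L1, before x y = false) :
    PySem.List.insertBy before x (L1 ++ L2) = L1 ++ PySem.List.insertBy before x L2 := by
  induction L1 with
  | nil => rfl
  | cons a t ih =>
    simp only [List.cons_append, PySem.List.insertBy, h a (by simp)]
    simp only [Bool.false_eq_true, if_false, List.cons.injEq, true_and]
    exact ih (fun y hy => h y (by simp [hy]))

theorem insertBy_of_forall_before {α : Type} (before : α → α → Bool) (x : α)
    (L : List α) (h : ∀ y ∈ L, before x y = true) :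
    PySem.List.insertBy before x L = x :: L := by
  cases L with
  | nil => rfl
  | cons a t => simp [PySem.List.insertBy, h a (by simp)]

-- stable insertion into a concatenation of buckets with strictly increasing keys:
-- the new element lands at the end of its own bucket
theorem insertBy_flatMap {β : Type} (a : Int × β) (ks : List Int) (B : Int → List (Int × β))
    (hks : ks.Pairwise (· < ·))
    (hB : ∀ k ∈ ks, ∀ x ∈ B k, x.1 = k)
    (hmem : a.1 ∈ ks) :
    PySem.List.insertBy (fun p q => decide (p.1 < q.1)) a (ks.flatMap B) =
      ks.flatMap (fun k => B k ++ if a.1 == k then [a] else []) := by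
  induction ks with
  | nil => cases hmem
  | cons k t ih =>
    have hkt : ∀ k' ∈ t, k < k' := (List.pairwise_cons.mp hks).1
    have hBk : ∀ x ∈ B k, x.1 = k := hB k (by simp)
    by_cases hak : a.1 = k
    · -- a belongs to the head bucket: skip B k, then a precedes everything in the tail
      have h1 : ∀ y ∈ B k, (decide (a.1 < y.1) : Bool) = false := by
        intro y hy; simp [hBk y hy, hak]
      have h2 : ∀ y ∈ t.flatMap B, (decide (a.1 < y.1) : Bool) = true := by
        intro y hy
        obtain ⟨k', hk', hyk'⟩ := List.mem_flatMap.mp hy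
        have := hB k' (by simp [hk']) y hyk'
        simp [this, hak]; exact hkt k' hk'
      have htail : ∀ k' ∈ t, (if (a.1 == k' : Bool) then [a] else []) = ([] : List (Int × β)) := by
        intro k' hk'
        have : a.1 ≠ k' := by have := hkt k' hk'; omega
        simp [this]
      have ht : List.flatMap (fun k' => B k' ++ if (a.1 == k') = true then [a] else []) t
          = List.flatMap B t :=
        List.flatMap_congr (fun k' hk' => by rw [htail k' hk', List.append_nil])
      rw [List.flatMap_cons, insertBy_append_of_not_before _ _ _ _ h1,
          insertBy_of_forall_before _ _ _ h2, List.flatMap_cons, ht]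
      simp [hak]
    · -- a belongs to a later bucket
      have hat : a.1 ∈ t := by cases hmem with
        | head => exact absurd rfl hak
        | tail _ h => exact h
      have h1 : ∀ y ∈ B k, (decide (a.1 < y.1) : Bool) = false := by
        intro y hy
        have hk : k < a.1 := hkt _ hat
        simp [hBk y hy]; omega
      rw [List.flatMap_cons, insertBy_append_of_not_before _ _ _ _ h1,
          ih (List.pairwise_cons.mp hks).2 (fun k' hk' => hB k' (by simp [hk'])) hat,
          List.flatMap_cons]
      have : (a.1 == k : Bool) = false := by simp [hak]
      simp [this]

-- the stable sort by the first component equals the buckets of ANY strictly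
-- increasing key list covering the keys, concatenated in order
theorem sorted_fst_eq_flatMap_filter {β : Type} (A : List (Int × β)) (ks : List Int)
    (hks : ks.Pairwise (· < ·)) (hcov : ∀ p ∈ A, p.1 ∈ ks) :
    PySem.List.sorted A (fun p => p.1) =
      ks.flatMap (fun k => A.filter (fun p => p.1 == k)) := by
  induction A using List.reverseRecOn with
  | nil => simp [PySem.List.sorted]
  | append_singleton A a ih =>
    rw [PySem.List.sorted_eq_foldl_insertBy, List.foldl_append,
        ← PySem.List.sorted_eq_foldl_insertBy,
        ih (fun p hp => hcov p (by simp [hp]))]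
    simp only [List.foldl_cons, List.foldl_nil]
    rw [insertBy_flatMap a ks (fun k => A.filter (fun p => p.1 == k)) hks
        (fun k _ x hx => by simpa using (List.mem_filter.mp hx).2)
        (hcov a (by simp))]
    apply List.flatMap_congr
    intro k _
    rw [List.filter_append]
    by_cases h : a.1 = k
    · simp [List.filter, h]
    · have hb : (a.1 == k) = false := by simpa using h
      simp [List.filter, hb]

-- ===== VERDICT (by name: the statement is the Claim_ definition above) =====
theorem sort_by_depth_spec : Claim_equal_sort_by_depth := by
  intro line_depth l_list _ _
  unfold Spec_sort_by_depth sort_by_depth sort_by_depth_alt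
  simp only [PySem.List.foldl_append_singleton_eq_map, List.nil_append]
  set f : Int × Int → Int := fun l => min (pvDepth line_depth l.1) (pvDepth line_depth l.2) with hf
  set g : Int × Int → Int × (Int × Int) := fun l => (f l, l) with hg
  set buckets := l_list.foldl
    (fun bs l =>
      let d := min (pvDepth line_depth l.1) (pvDepth line_depth l.2)
      bs.modify d [] (fun b => b ++ [(d, l)]))
    (PySem.Dict.empty : PySem.Dict Int (List (Int × (Int × Int)))) with hbuckets
  have hb2 : buckets = (l_list.map (fun l => (f l, (f l, l)))).foldl
      (fun d p => d.modify p.1 [] (fun b => b ++ [p.2])) PySem.Dict.empty := by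
    rw [hbuckets, List.foldl_map]
  have hkeys : buckets.keys = PySem.Set.ofList (l_list.map f) := by
    rw [hbuckets]
    rw [PySem.Dict.keys_foldl_modify_key l_list f []
        (fun _ x => fun b => b ++ [(f x, x)]) PySem.Dict.empty,
        PySem.Set.ofList_eq_foldl]
    simp [PySem.Set.update, PySem.Dict.keys, PySem.Dict.empty]
  have hbucket : ∀ c : Int, buckets.getD c [] = (l_list.map g).filter (fun p => p.1 == c) := by
    intro c
    rw [hb2, PySem.Dict.getD_foldl_modify_append]
    simp only [PySem.Dict.getD_empty, List.nil_append, List.filter_map]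
    simp [List.map_map, Function.comp_def, hg]
  have hks : (PySem.List.sorted buckets.keys (fun k => k)).Pairwise (· < ·) := by
    rw [hkeys]; exact PySem.List.sorted_ofList_pairwise_lt _
  have hcov : ∀ p ∈ l_list.map g, p.1 ∈ PySem.List.sorted buckets.keys (fun k => k) := by
    intro p hp
    obtain ⟨l, hl, rfl⟩ := List.mem_map.mp hp
    rw [PySem.List.mem_sorted, hkeys, PySem.Set.mem_ofList]
    exact List.mem_map.mpr ⟨l, hl, rfl⟩
  rw [sorted_fst_eq_flatMap_filter (l_list.map g) _ hks hcov,
      PySem.List.foldl_append_eq_flatMap, List.nil_append]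
  exact (List.flatMap_congr (fun c _ => hbucket c)).symm
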